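-- pv_equiv track=rewrite | github.com/jeremiah-c-leary/hdl-component-manager | hcm/svn/extract_hcm_json_revision.py | extract_hcm_json_revision
-- ===== SOURCE A (Python) =====
-- def extract_hcm_json_revision(lOutput):
--     fHcmDetected = False
--     for sLine in lOutput:
--         fHcmDetected = search_for_hcm_json_file(sLine, fHcmDetected)
--
--         if 'Last Changed Rev:' in sLine and fHcmDetected:
--             lLine = sLine.split()
--             sHcmRevision = lLine[-1]
--             return sHcmRevision
--     return None
--
-- def search_for_hcm_json_file(sLine, fHcmDetected):
--     if 'hcm.json' in sLine and not fHcmDetected: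
--         return True
--     return fHcmDetected
-- ===== SOURCE B (Python) =====
-- def extract_hcm_json_revision(lOutput):
--     # Phase 1: find the first line mentioning hcm.json.
--     for i, sLine in enumerate(lOutput):
--         if 'hcm.json' in sLine:
--             # Phase 2: from that line onward (inclusive), find the revision line.
--             for sLater in lOutput[i:]:
--                 if 'Last Changed Rev:' in sLater:
--                     return sLater.split()[-1]
--             return None
--     return None
-- ===== Notes on version B (the rewrite author's own statement) =====
-- stated objective: simpler
-- what changed: Replaces the single stateful pass with a monotone boolean flag and a helper by two flag-free phases: find the first line containing 'hcm.json', then scan from it (inclusive) for the first 'Last Changed Rev:' line and return its last token.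
import Mathlib
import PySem

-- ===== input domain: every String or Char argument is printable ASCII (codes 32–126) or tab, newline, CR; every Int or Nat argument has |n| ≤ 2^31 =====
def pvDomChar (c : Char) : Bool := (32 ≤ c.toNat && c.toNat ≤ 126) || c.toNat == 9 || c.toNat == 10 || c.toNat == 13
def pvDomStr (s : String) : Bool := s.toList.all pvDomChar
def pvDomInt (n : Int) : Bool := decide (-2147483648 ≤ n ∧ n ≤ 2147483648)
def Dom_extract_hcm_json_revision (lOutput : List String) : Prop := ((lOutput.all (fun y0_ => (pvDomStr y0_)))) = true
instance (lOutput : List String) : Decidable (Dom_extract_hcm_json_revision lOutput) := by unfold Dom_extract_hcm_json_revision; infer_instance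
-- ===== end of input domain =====

-- B replaces A's single stateful pass (flag + helper) with two flag-free phases: locate the
-- first 'hcm.json' line, then scan from it (inclusive) for the first 'Last Changed Rev:' line.

-- ===== PORT A =====
def search_for_hcm_json_file (sLine : String) (fHcmDetected : Bool) : Bool :=
  if PySem.Str.isIn "hcm.json" sLine && !fHcmDetected then true else fHcmDetected

def extractLoopA : List String → Bool → Option String
  | [], _ => none
  | sLine :: rest, fHcmDetected =>
      let f' := search_for_hcm_json_file sLine fHcmDetected
      if PySem.Str.isIn "Last Changed Rev:" sLine && f' then
        -- sLine.split()[-1]; pyGet? = none would be Python's IndexError (unreachable here)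
        PySem.List.pyGet? (PySem.Str.split₀ sLine) (-1)
      else extractLoopA rest f'

def extract_hcm_json_revision (lOutput : List String) : Option String :=
  extractLoopA lOutput false

-- ===== PORT B =====
-- phase 2: first 'Last Changed Rev:' line in the suffix, last token
def revScanB : List String → Option String
  | [] => none
  | sLater :: rest =>
      if PySem.Str.isIn "Last Changed Rev:" sLater then
        PySem.List.pyGet? (PySem.Str.split₀ sLater) (-1)
      else revScanB rest

-- phase 1: find the first line containing 'hcm.json'; the suffix 'sLine :: rest' is lOutput[i:]
def hcmScanB : List String → Option String
  | [] => none
  | sLine :: rest =>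
      if PySem.Str.isIn "hcm.json" sLine then revScanB (sLine :: rest)
      else hcmScanB rest

def extract_hcm_json_revision_alt (lOutput : List String) : Option String :=
  hcmScanB lOutput

-- ===== PRECONDITION & SPEC =====
def Spec_extract_hcm_json_revision (lOutput : List String) (out : Option String) : Prop := out = extract_hcm_json_revision_alt lOutput
instance (lOutput : List String) (out : Option String) : Decidable (Spec_extract_hcm_json_revision lOutput out) := by unfold Spec_extract_hcm_json_revision; infer_instance

-- ===== CLAIM (what is proved, stated in full; the proofs are below) =====
def Claim_equal_extract_hcm_json_revision : Prop := ∀ (lOutput : List String), Dom_extract_hcm_json_revision lOutput → Spec_extract_hcm_json_revision lOutput (extract_hcm_json_revision lOutput)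

-- ===== LEMMAS AND PROOFS =====

-- once the flag is set, A's remaining loop is exactly B's phase-2 scan
theorem loopA_true_eq_revScanB (l : List String) : extractLoopA l true = revScanB l := by
  induction l with
  | nil => rfl
  | cons s rest ih =>
      simp only [extractLoopA, revScanB, search_for_hcm_json_file]
      simp [ih]

-- with the flag still unset, A's loop is exactly B's phase-1 scan
theorem loopA_false_eq_hcmScanB (l : List String) : extractLoopA l false = hcmScanB l := by
  induction l with
  | nil => rfl
  | cons s rest ih =>
      simp only [extractLoopA, hcmScanB, revScanB, search_for_hcm_json_file]
      by_cases h : PySem.Chars.isIn ['h', 'c', 'm', '.', 'j', 's', 'o', 'n'] s.toList = true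
      · simp [PySem.Str.isIn, h, loopA_true_eq_revScanB]
      · simp [PySem.Str.isIn, h, ih]

-- ===== VERDICT (by name: the statement is the Claim_ definition above) =====
theorem extract_hcm_json_revision_spec : Claim_equal_extract_hcm_json_revision := by
  intro l _
  unfold Spec_extract_hcm_json_revision extract_hcm_json_revision extract_hcm_json_revision_alt
  exact loopA_false_eq_hcmScanB l
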